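-- pv_equiv track=rewrite | github.com/robofit/arcor2 | server.py | obj_description_from_base
-- ===== SOURCE A (Python) =====
-- from typing import Dict, Set, List
--
-- class DataError(Exception):
--     pass
--
-- def obj_description_from_base(data: Dict, obj_type: str) -> str:
--
--     try:
--         obj = data[obj_type]
--     except KeyError:
--         raise DataError(f"Unknown object type: {obj_type}.")
--
--     if obj["description"]:
--         return obj["description"]
--
--     if not obj["base"]:
--         return ""
--
--     return obj_description_from_base(data, obj["base"])
-- ===== SOURCE B (Python) =====
-- # B: whole-table fixpoint resolution instead of A's per-query recursion up the
-- # base chain: split entries into resolved/pending, then repeatedly substitute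
-- # resolved bases until nothing changes, and finally look up obj_type.
--
-- class DataError(Exception):
--     pass
--
--
-- def obj_description_from_base(data, obj_type):
--     if obj_type not in data:
--         raise DataError(f"Unknown object type: {obj_type}.")
--     resolved = {}
--     pending = {}
--     for k, obj in data.items():
--         d = obj.get("description", "")
--         b = obj.get("base", "")
--         if d:
--             resolved[k] = d
--         elif not b:
--             resolved[k] = ""
--         else:
--             pending[k] = b
--     changed = True
--     while changed and pending:
--         changed = False
--         for k, b in list(pending.items()):
--             if b in resolved:
--                 resolved[k] = resolved[b]
--                 del pending[k]
--                 changed = True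
--     return resolved.get(obj_type, "")
-- ===== Notes on version B (the rewrite author's own statement) =====
-- stated objective: alternative
-- what changed: A answers one query by recursing up the base chain; B instead resolves the whole table by fixpoint propagation (one pass splits entries into resolved/pending, then rounds substitute already-resolved bases until nothing changes) and looks obj_type up in the resolved map. Pre_ excludes exactly the inputs on which A raises: unknown obj_type (DataError), a visited entry missing 'description'/'base' (KeyError), or a cyclic base chain (RecursionError).
import Mathlib
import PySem

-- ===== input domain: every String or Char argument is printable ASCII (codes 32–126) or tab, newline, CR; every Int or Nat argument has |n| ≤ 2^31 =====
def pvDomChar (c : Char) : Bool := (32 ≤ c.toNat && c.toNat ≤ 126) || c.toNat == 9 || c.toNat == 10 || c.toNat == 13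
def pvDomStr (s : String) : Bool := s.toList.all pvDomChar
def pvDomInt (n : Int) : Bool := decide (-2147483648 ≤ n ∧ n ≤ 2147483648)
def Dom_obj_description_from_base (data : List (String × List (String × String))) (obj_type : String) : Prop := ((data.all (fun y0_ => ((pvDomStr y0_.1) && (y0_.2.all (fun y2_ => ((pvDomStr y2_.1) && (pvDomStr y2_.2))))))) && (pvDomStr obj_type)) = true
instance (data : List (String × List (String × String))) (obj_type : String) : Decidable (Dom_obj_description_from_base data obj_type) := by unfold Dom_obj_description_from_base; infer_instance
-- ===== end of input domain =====

-- B replaces A's per-query recursion up the base chain by a whole-table fixpoint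
-- propagation (resolve every type bottom-up, then look up obj_type); alternative algorithm, same values on Pre_.


-- ===== PORT A =====
-- A's recursion `return obj_description_from_base(data, obj["base"])`, fueled by
-- data.length+1 only to be total; under Pre_ the chain stops before the fuel runs out.
def pvDescendA (dd : PySem.Dict String (List (String × String))) : Nat → String → String
  | 0, _ => ""                     -- fuel exhausted: cyclic chain, Python RecursionError (outside Pre_)
  | Nat.succ n, t =>
    match dd.get? t with
    | none => ""                   -- raise DataError (outside Pre_)
    | some obj =>
      match (PySem.Dict.ofList obj).get? "description" with
      | none => ""                 -- KeyError (outside Pre_)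
      | some d =>
        if d ≠ "" then d
        else
          match (PySem.Dict.ofList obj).get? "base" with
          | none => ""             -- KeyError (outside Pre_)
          | some b => if b = "" then "" else pvDescendA dd n b

def obj_description_from_base (data : List (String × List (String × String))) (obj_type : String) : String :=
  pvDescendA (PySem.Dict.ofList data) (data.length + 1) obj_type

-- ===== PORT B =====
-- obj.get(k, "")
def pvFieldD (obj : List (String × String)) (k : String) : String :=
  (PySem.Dict.ofList obj).getD k ""

-- body of B's first loop: put each entry into resolved (truthy description, or no
-- base to inherit from) or pending (empty description, nonempty base)
def pvInitStep (acc : PySem.Dict String String × List (String × String))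
    (kv : String × List (String × String)) :
    PySem.Dict String String × List (String × String) :=
  let d := pvFieldD kv.2 "description"
  let b := pvFieldD kv.2 "base"
  if d ≠ "" then (acc.1.insert kv.1 d, acc.2)
  else if b = "" then (acc.1.insert kv.1 "", acc.2)
  else (acc.1, acc.2 ++ [(kv.1, b)])

def pvInit (items : List (String × List (String × String))) :
    PySem.Dict String String × List (String × String) :=
  items.foldl pvInitStep (PySem.Dict.empty, [])

-- body of one propagation step `if b in resolved: resolved[k] = resolved[b]; del pending[k]; changed = True`
def pvStep (acc : PySem.Dict String String × List (String × String) × Bool)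
    (kb : String × String) :
    PySem.Dict String String × List (String × String) × Bool :=
  match acc.1.get? kb.2 with
  | some v => (acc.1.insert kb.1 v, acc.2.1, true)
  | none => (acc.1, acc.2.1 ++ [kb], acc.2.2)

-- one round `for k, b in list(pending.items()): …`
def pvRound (res : PySem.Dict String String) (pend : List (String × String)) :
    PySem.Dict String String × List (String × String) × Bool :=
  pend.foldl pvStep (res, [], false)

-- termination facts for the while-loop (cited by pvFix's decreasing_by)
theorem pvStep_len_le (pend : List (String × String))
    (acc : PySem.Dict String String × List (String × String) × Bool) :
    ((pend.foldl pvStep acc).2.1).length ≤ acc.2.1.length + pend.length := by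
  induction pend generalizing acc with
  | nil => simp
  | cons kb tl ih =>
    simp only [List.foldl_cons]
    cases h : acc.1.get? kb.2 with
    | some v =>
      have := ih (acc.1.insert kb.1 v, acc.2.1, true)
      simp [pvStep, h] at this ⊢; omega
    | none =>
      have := ih (acc.1, acc.2.1 ++ [kb], acc.2.2)
      simp [pvStep, h] at this ⊢; omega

theorem pvStep_len_lt (pend : List (String × String))
    (acc : PySem.Dict String String × List (String × String) × Bool)
    (hc : acc.2.2 = false) (hch : (pend.foldl pvStep acc).2.2 = true) :
    ((pend.foldl pvStep acc).2.1).length < acc.2.1.length + pend.length := by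
  induction pend generalizing acc with
  | nil => simp only [List.foldl_nil] at hch; rw [hc] at hch; cases hch
  | cons kb tl ih =>
    simp only [List.foldl_cons] at hch ⊢
    cases h : acc.1.get? kb.2 with
    | some v =>
      have := pvStep_len_le tl (acc.1.insert kb.1 v, acc.2.1, true)
      simp [pvStep, h] at this ⊢; omega
    | none =>
      have h2 : (List.foldl pvStep (acc.1, acc.2.1 ++ [kb], acc.2.2) tl).2.2 = true := by
        simpa [pvStep, h] using hch
      have := ih (acc.1, acc.2.1 ++ [kb], acc.2.2) hc h2
      simp [pvStep, h] at this ⊢; omega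

theorem pvRound_lt (res : PySem.Dict String String) (pend : List (String × String))
    (h : (pvRound res pend).2.2 = true) : (pvRound res pend).2.1.length < pend.length := by
  have := pvStep_len_lt pend (res, [], false) rfl h
  simpa [pvRound] using this

-- the `while changed and pending:` loop
def pvFix (res : PySem.Dict String String) (pend : List (String × String)) :
    PySem.Dict String String :=
  if pend.isEmpty then res
  else if h : (pvRound res pend).2.2 = true then
    pvFix (pvRound res pend).1 (pvRound res pend).2.1
  else (pvRound res pend).1
termination_by pend.length
decreasing_by exact pvRound_lt res pend h

def obj_description_from_base_alt (data : List (String × List (String × String))) (obj_type : String) : String :=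
  let dd := PySem.Dict.ofList data
  if (dd.get? obj_type).isSome then
    let ip := pvInit dd.items
    (pvFix ip.1 ip.2).getD obj_type ""
  else ""                          -- raise DataError (outside Pre_)

-- ===== PRECONDITION & SPEC =====
-- the no-raise condition is a REACHABILITY property of the input (which keys the base
-- chain reaches), so it is necessarily stated as a walk; pvChainOk checks only presence
-- and shape along the chain — key present, both fields present, a stop reached within
-- the table size — and never computes a description or either program's output
def pvChainOk (dd : PySem.Dict String (List (String × String))) : Nat → String → Bool
  | 0, _ => false
  | Nat.succ n, t =>
    match dd.get? t with
    | none => false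
    | some obj =>
      match (PySem.Dict.ofList obj).get? "description" with
      | none => false
      | some d =>
        if d ≠ "" then true
        else
          match (PySem.Dict.ofList obj).get? "base" with
          | none => false
          | some b => if b = "" then true else pvChainOk dd n b

-- Pre_ excludes exactly the inputs on which A raises: unknown obj_type (DataError), a
-- visited entry missing "description"/"base" (KeyError), or a cyclic base chain
-- (RecursionError); A returns a value on every other input and B matches it there.
def Pre_obj_description_from_base (data : List (String × List (String × String))) (obj_type : String) : Prop :=
  pvChainOk (PySem.Dict.ofList data) (data.length + 1) obj_type = true
instance (data : List (String × List (String × String))) (obj_type : String) : Decidable (Pre_obj_description_from_base data obj_type) := by unfold Pre_obj_description_from_base; infer_instance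

def pvWitness_obj_description_from_base : (List (String × List (String × String))) × String :=
  ([("a", [("description", "hello"), ("base", "")]), ("b", [("description", ""), ("base", "a")])], "b")

def Spec_obj_description_from_base (data : List (String × List (String × String))) (obj_type : String) (out : String) : Prop := out = obj_description_from_base_alt data obj_type
instance (data : List (String × List (String × String))) (obj_type : String) (out : String) : Decidable (Spec_obj_description_from_base data obj_type out) := by unfold Spec_obj_description_from_base; infer_instance

-- ===== CLAIM (what is proved, stated in full; the proofs are below) =====
def Claim_equal_obj_description_from_base : Prop := ∀ (data : List (String × List (String × String))) (obj_type : String), Dom_obj_description_from_base data obj_type → Pre_obj_description_from_base data obj_type → Spec_obj_description_from_base data obj_type (obj_description_from_base data obj_type)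

-- ===== LEMMAS AND PROOFS =====

-- invariants of B's state, stated against A's recursion
def pvSound (dd : PySem.Dict String (List (String × String))) (N : Nat)
    (res : PySem.Dict String String) : Prop :=
  ∀ k v, res.get? k = some v → pvChainOk dd N k = true → v = pvDescendA dd N k

def pvPendEntry (dd : PySem.Dict String (List (String × String))) (k b : String) : Prop :=
  ∃ obj, dd.get? k = some obj ∧ pvFieldD obj "description" = "" ∧ pvFieldD obj "base" = b ∧ b ≠ ""

def pvPendGood (dd : PySem.Dict String (List (String × String)))
    (pend : List (String × String)) : Prop :=
  ∀ kb ∈ pend, pvPendEntry dd kb.1 kb.2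

def pvCover (dd : PySem.Dict String (List (String × String))) (N : Nat)
    (res : PySem.Dict String String) (pend : List (String × String)) : Prop :=
  ∀ t, pvChainOk dd N t = true → (res.get? t).isSome = true ∨ ∃ b, (t, b) ∈ pend

theorem pvChainOk_mono (dd : PySem.Dict String (List (String × String))) :
    ∀ {n m : Nat} {t : String}, n ≤ m → pvChainOk dd n t = true → pvChainOk dd m t = true := by
  intro n
  induction n with
  | zero => intro m t _ h; simp [pvChainOk] at h
  | succ n ih =>
    intro m t hle h
    obtain ⟨m', rfl⟩ : ∃ m', m = m' + 1 := ⟨m - 1, by omega⟩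
    cases hg : dd.get? t with
    | none => simp [pvChainOk, hg] at h
    | some obj =>
      cases hd : (PySem.Dict.ofList obj).get? "description" with
      | none => simp [pvChainOk, hg, hd] at h
      | some d =>
        by_cases hde : d = ""
        · subst hde
          cases hb : (PySem.Dict.ofList obj).get? "base" with
          | none => simp [pvChainOk, hg, hd, hb] at h
          | some b =>
            by_cases hbe : b = ""
            · simp [pvChainOk, hg, hd, hb, hbe]
            · simp only [pvChainOk, hg, hd, hb, ne_eq, not_true_eq_false, if_false,
                if_neg hbe] at h ⊢
              exact ih (by omega) h
        · simp [pvChainOk, hg, hd, hde]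

theorem pvDescendA_fuel (dd : PySem.Dict String (List (String × String))) :
    ∀ {n : Nat} (m : Nat) {t : String}, pvChainOk dd n t = true → n ≤ m →
      pvDescendA dd m t = pvDescendA dd n t := by
  intro n
  induction n with
  | zero => intro m t h _; simp [pvChainOk] at h
  | succ n ih =>
    intro m t h hle
    obtain ⟨m', rfl⟩ : ∃ m', m = m' + 1 := ⟨m - 1, by omega⟩
    cases hg : dd.get? t with
    | none => simp [pvDescendA, hg]
    | some obj =>
      cases hd : (PySem.Dict.ofList obj).get? "description" with
      | none => simp [pvDescendA, hg, hd]
      | some d =>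
        by_cases hde : d = ""
        · subst hde
          cases hb : (PySem.Dict.ofList obj).get? "base" with
          | none => simp [pvDescendA, hg, hd, hb]
          | some b =>
            by_cases hbe : b = ""
            · simp [pvDescendA, hg, hd, hb, hbe]
            · simp only [pvChainOk, hg, hd, hb, ne_eq, not_true_eq_false, if_false,
                if_neg hbe] at h
              simp only [pvDescendA, hg, hd, hb, ne_eq, not_true_eq_false, if_false,
                if_neg hbe]
              exact ih m' h (by omega)
        · simp [pvDescendA, hg, hd, hde]

theorem pvChainOk_isSome (dd : PySem.Dict String (List (String × String))) (n : Nat) (t : String)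
    (h : pvChainOk dd n t = true) : (dd.get? t).isSome = true := by
  cases n with
  | zero => simp [pvChainOk] at h
  | succ n =>
    simp only [pvChainOk] at h
    cases hg : dd.get? t with
    | none => rw [hg] at h; simp at h
    | some obj => simp

theorem pvPendEntry_chain (dd : PySem.Dict String (List (String × String))) (n : Nat)
    (k b : String) (hp : pvPendEntry dd k b) (hc : pvChainOk dd (n + 1) k = true) :
    pvChainOk dd n b = true ∧ pvDescendA dd (n + 1) k = pvDescendA dd n b := by
  obtain ⟨obj, hk, hdesc, hbase, hbne⟩ := hp
  cases hd : (PySem.Dict.ofList obj).get? "description" with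
  | none =>
    exfalso
    have := PySem.Dict.getD_eq_get?_getD (PySem.Dict.ofList obj) "description" ""
    rw [hd] at this
    simp [pvChainOk, hk, hd] at hc
  | some d =>
    have hde : d = "" := by
      have := PySem.Dict.getD_eq_get?_getD (PySem.Dict.ofList obj) "description" ""
      rw [hd] at this
      simpa [pvFieldD, this] using hdesc
    subst hde
    cases hb : (PySem.Dict.ofList obj).get? "base" with
    | none =>
      exfalso
      have := PySem.Dict.getD_eq_get?_getD (PySem.Dict.ofList obj) "base" ""
      rw [hb] at this
      exact hbne (by simpa [pvFieldD, this] using hbase.symm)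
    | some b0 =>
      have hb0 : b0 = b := by
        have := PySem.Dict.getD_eq_get?_getD (PySem.Dict.ofList obj) "base" ""
        rw [hb] at this
        simpa [pvFieldD, this] using hbase
      subst hb0
      constructor
      · simpa [pvChainOk, hk, hd, hb, hbne] using hc
      · simp [pvDescendA, hk, hd, hb, hbne]

theorem pvPendEntry_stepN (dd : PySem.Dict String (List (String × String))) (N : Nat)
    (k b : String) (hp : pvPendEntry dd k b) (hc : pvChainOk dd N k = true) :
    pvChainOk dd N b = true ∧ pvDescendA dd N k = pvDescendA dd N b := by
  cases N with
  | zero => simp [pvChainOk] at hc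
  | succ n =>
    obtain ⟨hcb, heq⟩ := pvPendEntry_chain dd n k b hp hc
    refine ⟨pvChainOk_mono dd (by omega) hcb, ?_⟩
    rw [heq, pvDescendA_fuel dd (n + 1) hcb (by omega)]

theorem pvSound_insert (dd : PySem.Dict String (List (String × String))) (N : Nat)
    (res : PySem.Dict String String) (k v : String) (hs : pvSound dd N res)
    (hv : pvChainOk dd N k = true → v = pvDescendA dd N k) :
    pvSound dd N (res.insert k v) := by
  intro k' w hw hck'
  rw [PySem.Dict.get?_insert] at hw
  split at hw
  · rename_i heq
    subst heq
    cases hw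
    exact hv hck'
  · exact hs k' w hw hck'

theorem pvGet?_insert_isSome (res : PySem.Dict String String) (k v k' : String)
    (h : (res.get? k').isSome = true) : ((res.insert k v).get? k').isSome = true := by
  rw [PySem.Dict.get?_insert]
  split <;> simp [h]

-- values A computes for the entries B resolves in its first pass
theorem pvInit_val_desc (dd : PySem.Dict String (List (String × String))) (N : Nat)
    (k : String) (obj : List (String × String)) (hk : dd.get? k = some obj)
    (hd : pvFieldD obj "description" ≠ "") (hc : pvChainOk dd N k = true) :
    pvFieldD obj "description" = pvDescendA dd N k := by
  cases N with
  | zero => simp [pvChainOk] at hc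
  | succ n =>
    cases hdd : (PySem.Dict.ofList obj).get? "description" with
    | none =>
      exfalso
      have := PySem.Dict.getD_eq_get?_getD (PySem.Dict.ofList obj) "description" ""
      rw [hdd] at this
      exact hd (by simpa [pvFieldD] using this)
    | some d =>
      have hdv : pvFieldD obj "description" = d := by
        have := PySem.Dict.getD_eq_get?_getD (PySem.Dict.ofList obj) "description" ""
        rw [hdd] at this
        simpa [pvFieldD] using this
      rw [hdv] at hd ⊢
      simp [pvDescendA, hk, hdd, hd]

theorem pvInit_val_nobase (dd : PySem.Dict String (List (String × String))) (N : Nat)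
    (k : String) (obj : List (String × String)) (hk : dd.get? k = some obj)
    (hd : pvFieldD obj "description" = "") (hb : pvFieldD obj "base" = "")
    (hc : pvChainOk dd N k = true) : ("" : String) = pvDescendA dd N k := by
  cases N with
  | zero => simp [pvChainOk] at hc
  | succ n =>
    cases hdd : (PySem.Dict.ofList obj).get? "description" with
    | none => simp [pvChainOk, hk, hdd] at hc
    | some d =>
      have hdv : d = "" := by
        have := PySem.Dict.getD_eq_get?_getD (PySem.Dict.ofList obj) "description" ""
        rw [hdd] at this
        simpa [pvFieldD, this] using hd
      subst hdv
      cases hbb : (PySem.Dict.ofList obj).get? "base" with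
      | none => simp [pvChainOk, hk, hdd, hbb] at hc
      | some b0 =>
        have hbv : b0 = "" := by
          have := PySem.Dict.getD_eq_get?_getD (PySem.Dict.ofList obj) "base" ""
          rw [hbb] at this
          simpa [pvFieldD, this] using hb
        subst hbv
        simp [pvDescendA, hk, hdd, hbb]

-- B's first pass establishes the invariants and covers every entry of the table
theorem pvInit_inv (dd : PySem.Dict String (List (String × String))) (N : Nat) :
    ∀ (items : List (String × List (String × String)))
      (acc : PySem.Dict String String × List (String × String)),
      (∀ kv ∈ items, dd.get? kv.1 = some kv.2) →
      pvSound dd N acc.1 → pvPendGood dd acc.2 →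
      pvSound dd N (items.foldl pvInitStep acc).1 ∧
      pvPendGood dd (items.foldl pvInitStep acc).2 ∧
      (∀ k, (acc.1.get? k).isSome = true → ((items.foldl pvInitStep acc).1.get? k).isSome = true) ∧
      (∀ kb ∈ acc.2, kb ∈ (items.foldl pvInitStep acc).2) ∧
      (∀ kv ∈ items, ((items.foldl pvInitStep acc).1.get? kv.1).isSome = true ∨
        ∃ b, (kv.1, b) ∈ (items.foldl pvInitStep acc).2) := by
  intro items
  induction items with
  | nil =>
    intro acc _ hs hp
    exact ⟨hs, hp, fun _ h => h, fun _ h => h, by simp⟩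
  | cons kv tl ih =>
    intro acc hmem hs hp
    have hk : dd.get? kv.1 = some kv.2 := hmem kv (by simp)
    have hmem' : ∀ kv' ∈ tl, dd.get? kv'.1 = some kv'.2 := fun kv' h => hmem kv' (by simp [h])
    simp only [List.foldl_cons]
    by_cases hd : pvFieldD kv.2 "description" ≠ ""
    · have hstep : pvInitStep acc kv = (acc.1.insert kv.1 (pvFieldD kv.2 "description"), acc.2) := by
        simp [pvInitStep, hd]
      rw [hstep]
      have hs' : pvSound dd N (acc.1.insert kv.1 (pvFieldD kv.2 "description")) :=
        pvSound_insert dd N acc.1 _ _ hs (fun hc => pvInit_val_desc dd N kv.1 kv.2 hk hd hc)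
      obtain ⟨s1, s2, s3, s4, s5⟩ :=
        ih (acc.1.insert kv.1 (pvFieldD kv.2 "description"), acc.2) hmem' hs' hp
      refine ⟨s1, s2, fun k h => s3 k (pvGet?_insert_isSome _ _ _ _ h), s4, ?_⟩
      intro kv' h
      rcases List.mem_cons.mp h with rfl | h'
      · exact Or.inl (s3 kv'.1 (by rw [PySem.Dict.get?_insert_self]; rfl))
      · exact s5 kv' h'
    · rw [not_not] at hd
      by_cases hb : pvFieldD kv.2 "base" = ""
      · have hstep : pvInitStep acc kv = (acc.1.insert kv.1 "", acc.2) := by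
          simp [pvInitStep, hd, hb]
        rw [hstep]
        have hs' : pvSound dd N (acc.1.insert kv.1 "") :=
          pvSound_insert dd N acc.1 _ _ hs (fun hc => pvInit_val_nobase dd N kv.1 kv.2 hk hd hb hc)
        obtain ⟨s1, s2, s3, s4, s5⟩ := ih (acc.1.insert kv.1 "", acc.2) hmem' hs' hp
        refine ⟨s1, s2, fun k h => s3 k (pvGet?_insert_isSome _ _ _ _ h), s4, ?_⟩
        intro kv' h
        rcases List.mem_cons.mp h with rfl | h'
        · exact Or.inl (s3 kv'.1 (by rw [PySem.Dict.get?_insert_self]; rfl))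
        · exact s5 kv' h'
      · have hstep : pvInitStep acc kv = (acc.1, acc.2 ++ [(kv.1, pvFieldD kv.2 "base")]) := by
          simp [pvInitStep, hd, hb]
        rw [hstep]
        have hp' : pvPendGood dd (acc.2 ++ [(kv.1, pvFieldD kv.2 "base")]) := by
          intro kb hkb
          rcases List.mem_append.mp hkb with h' | h'
          · exact hp kb h'
          · simp at h'
            subst h'
            exact ⟨kv.2, hk, hd, rfl, hb⟩
        obtain ⟨s1, s2, s3, s4, s5⟩ :=
          ih (acc.1, acc.2 ++ [(kv.1, pvFieldD kv.2 "base")]) hmem' hs hp'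
        refine ⟨s1, s2, s3, fun kb h => s4 kb (by simp [h]), ?_⟩
        intro kv' h
        rcases List.mem_cons.mp h with rfl | h'
        · exact Or.inr ⟨pvFieldD kv'.2 "base", s4 (kv'.1, pvFieldD kv'.2 "base") (by simp)⟩
        · exact s5 kv' h'

-- one propagation round preserves the invariants
theorem pvRound_inv (dd : PySem.Dict String (List (String × String))) (N : Nat) :
    ∀ (pend : List (String × String))
      (acc : PySem.Dict String String × List (String × String) × Bool),
      pvPendGood dd pend → pvSound dd N acc.1 → pvPendGood dd acc.2.1 →
      pvSound dd N (pend.foldl pvStep acc).1 ∧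
      pvPendGood dd (pend.foldl pvStep acc).2.1 ∧
      (∀ k, (acc.1.get? k).isSome = true → ((pend.foldl pvStep acc).1.get? k).isSome = true) ∧
      (∀ kb ∈ acc.2.1, kb ∈ (pend.foldl pvStep acc).2.1 ∨
        ((pend.foldl pvStep acc).1.get? kb.1).isSome = true) ∧
      (∀ kb ∈ pend, kb ∈ (pend.foldl pvStep acc).2.1 ∨
        ((pend.foldl pvStep acc).1.get? kb.1).isSome = true) := by
  intro pend
  induction pend with
  | nil =>
    intro acc _ hs hp
    exact ⟨hs, hp, fun _ h => h, fun kb h => Or.inl h, by simp⟩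
  | cons kb tl ih =>
    intro acc hpg hs hp
    have hent : pvPendEntry dd kb.1 kb.2 := hpg kb (by simp)
    have hpg' : pvPendGood dd tl := fun kb' h => hpg kb' (by simp [h])
    simp only [List.foldl_cons]
    cases h : acc.1.get? kb.2 with
    | some v =>
      have hstep : pvStep acc kb = (acc.1.insert kb.1 v, acc.2.1, true) := by
        simp [pvStep, h]
      rw [hstep]
      have hs' : pvSound dd N (acc.1.insert kb.1 v) := by
        refine pvSound_insert dd N acc.1 _ _ hs (fun hc => ?_)
        obtain ⟨hcb, heq⟩ := pvPendEntry_stepN dd N kb.1 kb.2 hent hc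
        rw [heq]
        exact hs kb.2 v h hcb
      obtain ⟨s1, s2, s3, s4, s5⟩ := ih (acc.1.insert kb.1 v, acc.2.1, true) hpg' hs' hp
      refine ⟨s1, s2, fun k hk => s3 k (pvGet?_insert_isSome _ _ _ _ hk), s4, ?_⟩
      intro kb' hkb'
      rcases List.mem_cons.mp hkb' with rfl | h'
      · exact Or.inr (s3 kb'.1 (by rw [PySem.Dict.get?_insert_self]; rfl))
      · exact s5 kb' h'
    | none =>
      have hstep : pvStep acc kb = (acc.1, acc.2.1 ++ [kb], acc.2.2) := by
        simp [pvStep, h]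
      rw [hstep]
      have hp' : pvPendGood dd (acc.2.1 ++ [kb]) := by
        intro kb' hkb'
        rcases List.mem_append.mp hkb' with h' | h'
        · exact hp kb' h'
        · simp at h'; subst h'; exact hent
      obtain ⟨s1, s2, s3, s4, s5⟩ := ih (acc.1, acc.2.1 ++ [kb], acc.2.2) hpg' hs hp'
      refine ⟨s1, s2, s3, fun kb' hkb' => s4 kb' (by simp [hkb']), ?_⟩
      intro kb' hkb'
      rcases List.mem_cons.mp hkb' with rfl | h'
      · exact s4 kb' (by simp)
      · exact s5 kb' h'

theorem pvStep_changed_mono (pend : List (String × String))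
    (acc : PySem.Dict String String × List (String × String) × Bool)
    (h : acc.2.2 = true) : (pend.foldl pvStep acc).2.2 = true := by
  induction pend generalizing acc with
  | nil => simpa
  | cons kb tl ih =>
    simp only [List.foldl_cons]
    cases hg : acc.1.get? kb.2 with
    | some v =>
      rw [show pvStep acc kb = (acc.1.insert kb.1 v, acc.2.1, true) from by simp [pvStep, hg]]
      exact ih (acc.1.insert kb.1 v, acc.2.1, true) rfl
    | none =>
      rw [show pvStep acc kb = (acc.1, acc.2.1 ++ [kb], acc.2.2) from by simp [pvStep, hg]]
      exact ih (acc.1, acc.2.1 ++ [kb], acc.2.2) (by simpa using h)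

-- a round with no progress: nothing moved and every pending base is unresolved
theorem pvStuck_facts :
    ∀ (pend : List (String × String))
      (acc : PySem.Dict String String × List (String × String) × Bool),
      acc.2.2 = false → (pend.foldl pvStep acc).2.2 = false →
      (pend.foldl pvStep acc).1 = acc.1 ∧
      (pend.foldl pvStep acc).2.1 = acc.2.1 ++ pend ∧
      ∀ kb ∈ pend, acc.1.get? kb.2 = none := by
  intro pend
  induction pend with
  | nil => intro acc _ _; simp
  | cons kb tl ih =>
    intro acc hc hres
    simp only [List.foldl_cons] at hres ⊢
    cases hg : acc.1.get? kb.2 with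
    | some v =>
      exfalso
      rw [show pvStep acc kb = (acc.1.insert kb.1 v, acc.2.1, true) by simp [pvStep, hg]] at hres
      have := pvStep_changed_mono tl (acc.1.insert kb.1 v, acc.2.1, true) rfl
      rw [hres] at this; exact Bool.false_ne_true this
    | none =>
      rw [show pvStep acc kb = (acc.1, acc.2.1 ++ [kb], acc.2.2) by simp [pvStep, hg]] at hres ⊢
      obtain ⟨f1, f2, f3⟩ := ih (acc.1, acc.2.1 ++ [kb], acc.2.2) hc hres
      refine ⟨f1, by simpa using f2, ?_⟩
      intro kb' hkb'
      rcases List.mem_cons.mp hkb' with rfl | h'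
      · exact hg
      · exact f3 kb' h'

-- in a stuck state every key with a valid chain is already resolved
theorem pvStuck_complete (dd : PySem.Dict String (List (String × String))) (N : Nat)
    (res : PySem.Dict String String) (pend : List (String × String))
    (hstuck : ∀ kb ∈ pend, res.get? kb.2 = none)
    (hcov : pvCover dd N res pend) (hpg : pvPendGood dd pend) :
    ∀ n t, n ≤ N → pvChainOk dd n t = true → (res.get? t).isSome = true := by
  intro n
  induction n with
  | zero => intro t _ h; simp [pvChainOk] at h
  | succ n ih =>
    intro t hle hc
    rcases hcov t (pvChainOk_mono dd hle hc) with h | ⟨b, hb⟩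
    · exact h
    · exfalso
      have hent : pvPendEntry dd t b := hpg (t, b) hb
      obtain ⟨hcb, _⟩ := pvPendEntry_chain dd n t b hent hc
      have := ih b (by omega) hcb
      rw [hstuck (t, b) hb] at this
      exact Bool.false_ne_true this

-- the fixpoint loop resolves every key with a valid chain to A's value
theorem pvFix_complete (dd : PySem.Dict String (List (String × String))) (N : Nat) :
    ∀ (fuel : Nat) (pend : List (String × String)) (res : PySem.Dict String String),
      pend.length ≤ fuel →
      pvSound dd N res → pvPendGood dd pend → pvCover dd N res pend →
      ∀ t, pvChainOk dd N t = true →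
        (pvFix res pend).get? t = some (pvDescendA dd N t) := by
  intro fuel
  induction fuel with
  | zero =>
    intro pend res hlen hs hpg hcov t hc
    have hpe : pend = [] := List.eq_nil_of_length_eq_zero (by omega)
    subst hpe
    rw [pvFix]
    simp only [List.isEmpty_nil, reduceIte]
    rcases hcov t hc with h | ⟨b, hb⟩
    · obtain ⟨v, hv⟩ := Option.isSome_iff_exists.mp h
      rw [hv, hs t v hv hc]
    · simp at hb
  | succ fuel ih =>
    intro pend res hlen hs hpg hcov t hc
    by_cases hpe : pend.isEmpty
    · rw [pvFix, if_pos hpe]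
      rcases hcov t hc with h | ⟨b, hb⟩
      · obtain ⟨v, hv⟩ := Option.isSome_iff_exists.mp h
        rw [hv, hs t v hv hc]
      · rw [List.isEmpty_iff.mp hpe] at hb; simp at hb
    · obtain ⟨s1, s2, s3, s4, s5⟩ :=
        pvRound_inv dd N pend (res, [], false) hpg hs (by intro kb h; simp at h)
      have hcov' : pvCover dd N (pvRound res pend).1 (pvRound res pend).2.1 := by
        intro t' hc'
        rcases hcov t' hc' with h | ⟨b, hb⟩
        · exact Or.inl (s3 t' h)
        · rcases s5 (t', b) hb with h' | h'
          · exact Or.inr ⟨b, h'⟩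
          · exact Or.inl h'
      by_cases hch : (pvRound res pend).2.2 = true
      · rw [pvFix, if_neg hpe, dif_pos hch]
        exact ih (pvRound res pend).2.1 (pvRound res pend).1
          (by have := pvRound_lt res pend hch; omega) s1 s2 hcov' t hc
      · rw [pvFix, if_neg hpe, dif_neg hch]
        have hchf : (pend.foldl pvStep (res, [], false)).2.2 = false := by
          simpa [pvRound] using (Bool.not_eq_true _).mp hch
        obtain ⟨f1, f2, f3⟩ := pvStuck_facts pend (res, [], false) rfl hchf
        have hres : (pvRound res pend).1 = res := by simpa [pvRound] using f1
        rw [hres]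
        have hst : ∀ kb ∈ pend, res.get? kb.2 = none := by
          intro kb hkb; simpa using f3 kb hkb
        have := pvStuck_complete dd N res pend hst hcov hpg N t le_rfl hc
        obtain ⟨v, hv⟩ := Option.isSome_iff_exists.mp this
        rw [hv, hs t v hv hc]

-- ===== VERDICT (by name: the statement is the Claim_ definition above) =====
theorem obj_description_from_base_spec : Claim_equal_obj_description_from_base := by
  intro data obj_type _ hpre
  unfold Pre_obj_description_from_base at hpre
  unfold Spec_obj_description_from_base obj_description_from_base obj_description_from_base_alt
  have hsome := pvChainOk_isSome (PySem.Dict.ofList data) (data.length + 1) obj_type hpre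
  rw [if_pos hsome]
  have hnd : (PySem.Dict.ofList data).keys.Nodup := PySem.Dict.nodup_keys_ofList data
  have hmem : ∀ kv ∈ (PySem.Dict.ofList data).items,
      (PySem.Dict.ofList data).get? kv.1 = some kv.2 := by
    intro kv h
    exact PySem.Dict.get?_of_mem_items (PySem.Dict.ofList data) (by simpa using h) hnd
  have hsE : pvSound (PySem.Dict.ofList data) (data.length + 1) PySem.Dict.empty := by
    intro k v h _
    rw [PySem.Dict.get?_empty] at h
    cases h
  have hpE : pvPendGood (PySem.Dict.ofList data) ([] : List (String × String)) := by
    intro kb h; simp at h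
  obtain ⟨s1, s2, s3, s4, s5⟩ :=
    pvInit_inv (PySem.Dict.ofList data) (data.length + 1)
      (PySem.Dict.ofList data).items (PySem.Dict.empty, []) hmem hsE hpE
  have hcov : pvCover (PySem.Dict.ofList data) (data.length + 1)
      (pvInit (PySem.Dict.ofList data).items).1 (pvInit (PySem.Dict.ofList data).items).2 := by
    intro t hct
    have hts := pvChainOk_isSome (PySem.Dict.ofList data) (data.length + 1) t hct
    obtain ⟨obj, hobj⟩ := Option.isSome_iff_exists.mp hts
    have hin : (t, obj) ∈ (PySem.Dict.ofList data).items :=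
      PySem.Dict.mem_items_of_get?_eq_some (PySem.Dict.ofList data) hobj
    simpa [pvInit] using s5 (t, obj) hin
  have hfin := pvFix_complete (PySem.Dict.ofList data) (data.length + 1)
    (pvInit (PySem.Dict.ofList data).items).2.length
    (pvInit (PySem.Dict.ofList data).items).2
    (pvInit (PySem.Dict.ofList data).items).1
    le_rfl (by simpa [pvInit] using s1) (by simpa [pvInit] using s2) hcov obj_type hpre
  rw [PySem.Dict.getD_eq_get?_getD, hfin]
  rfl
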